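-- pv_equiv track=rewrite | github.com/PhilipGSanova/CSA-0664-Design-and-Analysis-of-Algorithms | Assignment - 9/Destroy Sequential Targets.py | min_value_to_destroy_targets
-- ===== SOURCE A (Python) =====
-- def min_value_to_destroy_targets(nums, space):
--     max_targets = 0
--     min_value = float('inf')
--
--     for num in nums:
--         targets = sum(1 for i in range(num, max(nums)+space, space) if i in nums)
--         if targets > max_targets or (targets == max_targets and num < min_value):
--             max_targets = targets
--             min_value = num
--
--     return min_value
-- ===== SOURCE B (Python) =====
-- def min_value_to_destroy_targets(nums, space):
--     # one pass: per residue class keep (distinct count, minimum); the class minimum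
--     # destroys the whole class, so the answer is the min of the largest class.
--     groups = {}
--     seen = set()
--     for v in nums:
--         if v not in seen:
--             seen.add(v)
--             r = v % space
--             if r in groups:
--                 cnt, mn = groups[r]
--                 groups[r] = (cnt + 1, v if v < mn else mn)
--             else:
--                 groups[r] = (1, v)
--     best_cnt, best_val = 0, None
--     for cnt, mn in groups.values():
--         if cnt > best_cnt or (cnt == best_cnt and (best_val is None or mn < best_val)):
--             best_cnt, best_val = cnt, mn
--     return best_val
-- ===== Notes on version B (the rewrite author's own statement) =====
-- stated objective: faster
-- what changed: Instead of re-scanning, for every element, the whole arithmetic progression up to max(nums) with a linear membership test per step, B makes one pass building a dict residue-class -> (distinct count, minimum), since the class minimum destroys the entire class; the answer is the minimum of a largest class.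
-- outside the precondition, e.g. on min_value_to_destroy_targets([1, 10], -1): A returns 10, B returns 1
import Mathlib
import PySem

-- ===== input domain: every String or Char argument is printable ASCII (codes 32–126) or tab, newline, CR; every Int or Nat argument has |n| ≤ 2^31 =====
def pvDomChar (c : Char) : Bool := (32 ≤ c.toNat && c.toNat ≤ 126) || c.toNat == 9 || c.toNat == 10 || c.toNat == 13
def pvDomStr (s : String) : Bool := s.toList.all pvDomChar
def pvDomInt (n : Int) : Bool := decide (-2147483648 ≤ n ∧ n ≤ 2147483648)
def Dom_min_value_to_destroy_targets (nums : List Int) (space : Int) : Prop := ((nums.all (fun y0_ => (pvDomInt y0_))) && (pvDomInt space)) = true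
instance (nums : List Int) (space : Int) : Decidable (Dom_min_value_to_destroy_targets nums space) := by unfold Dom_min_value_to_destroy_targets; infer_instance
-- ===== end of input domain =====

-- B replaces A's per-element rescan of the whole arithmetic progression by one grouping pass
-- (residue class -> distinct count and minimum); measured objective: faster (asymptotic).


-- ===== PORT A =====
-- literal transliteration: for each num, count i in range(num, max(nums)+space, space) with i in nums;
-- min_value starts as float('inf'), modelled as 'none'; under Pre_ it is always replaced, .getD 0 is never hit.
def min_value_to_destroy_targets (nums : List Int) (space : Int) : Int :=
  let st : Int × Option Int := nums.foldl (fun st num =>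
    let targets : Int :=
      (PySem.List.pyRange num ((PySem.List.max? nums (fun x => x)).getD 0 + space) space).foldl
        (fun acc i => if nums.contains i then acc + 1 else acc) 0
    if targets > st.1 || (targets == st.1 &&
        (match st.2 with | none => true | some mv => decide (num < mv))) then
      (targets, some num)
    else st) (0, none)
  st.2.getD 0

-- ===== PORT B =====
-- literal transliteration of Source B: one pass building seen-set and dict residue -> (distinct count, min);
-- best_val starts as None, modelled as 'none'; under Pre_ the .getD 0 is never hit.
def min_value_to_destroy_targets_alt (nums : List Int) (space : Int) : Int :=
  let gs : PySem.Set Int × PySem.Dict Int (Int × Int) := nums.foldl (fun p v =>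
    if PySem.Set.contains p.1 v then p
    else
      let r := PySem.Int.mod v space
      match p.2.get? r with
      | some (cnt, mn) => (PySem.Set.add p.1 v, p.2.insert r (cnt + 1, if v < mn then v else mn))
      | none => (PySem.Set.add p.1 v, p.2.insert r (1, v)))
    (PySem.Set.empty, PySem.Dict.empty)
  let st : Int × Option Int := (PySem.Dict.values gs.2).foldl (fun st q =>
    if q.1 > st.1 || (q.1 == st.1 &&
        (match st.2 with | none => true | some bv => decide (q.2 < bv))) then
      (q.1, some q.2)
    else st) (0, none)
  st.2.getD 0

-- ===== PRECONDITION & SPEC =====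
-- Pre_ excludes: nums = [] (A's max(nums) raises ValueError); space = 0 (range step 0 raises ValueError);
-- and space < 0, where A returns a value but its downward range truncated at max(nums)+space counts an
-- accidental set outside the task's natural domain ('space' between targets), while B does the natural grouping.
def Pre_min_value_to_destroy_targets (nums : List Int) (space : Int) : Prop :=
  nums ≠ [] ∧ 1 ≤ space
instance (nums : List Int) (space : Int) : Decidable (Pre_min_value_to_destroy_targets nums space) := by
  unfold Pre_min_value_to_destroy_targets; infer_instance

def pvWitness_min_value_to_destroy_targets : List Int × Int := ([1, 2, 4], 2)

def Spec_min_value_to_destroy_targets (nums : List Int) (space : Int) (out : Int) : Prop := out = min_value_to_destroy_targets_alt nums space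
instance (nums : List Int) (space : Int) (out : Int) : Decidable (Spec_min_value_to_destroy_targets nums space out) := by unfold Spec_min_value_to_destroy_targets; infer_instance

-- ===== CLAIM (what is proved, stated in full; the proofs are below) =====
def Claim_equal_min_value_to_destroy_targets : Prop := ∀ (nums : List Int) (space : Int), Dom_min_value_to_destroy_targets nums space → Pre_min_value_to_destroy_targets nums space → Spec_min_value_to_destroy_targets nums space (min_value_to_destroy_targets nums space)

-- ===== LEMMAS AND PROOFS =====

-- "p is strictly better than cur": more targets, or equal targets and smaller value
def pvGoodb (cur p : Int × Int) : Bool :=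
  p.1 > cur.1 || (p.1 == cur.1 && decide (p.2 < cur.2))

def pvMax (cur p : Int × Int) : Int × Int := if pvGoodb cur p then p else cur

def pvStep (st : Int × Option Int) (p : Int × Int) : Int × Option Int :=
  if p.1 > st.1 || (p.1 == st.1 &&
      (match st.2 with | none => true | some mv => decide (p.2 < mv))) then
    (p.1, some p.2)
  else st

theorem pvGoodb_true_iff (x y : Int × Int) :
    pvGoodb x y = true ↔ (x.1 < y.1 ∨ (y.1 = x.1 ∧ y.2 < x.2)) := by
  simp only [pvGoodb, Bool.or_eq_true, Bool.and_eq_true, beq_iff_eq, decide_eq_true_eq, gt_iff_lt]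

theorem pvGoodb_false_iff (x y : Int × Int) :
    pvGoodb x y = false ↔ (y.1 < x.1 ∨ (y.1 = x.1 ∧ x.2 ≤ y.2)) := by
  rw [← Bool.not_eq_true, pvGoodb_true_iff]
  omega

theorem pvGoodb_irrefl (x : Int × Int) : pvGoodb x x = false := by
  rw [pvGoodb_false_iff]; omega

theorem pvGoodb_trans_not {x y z : Int × Int} (h1 : pvGoodb x y = false) (h2 : pvGoodb y z = false) :
    pvGoodb x z = false := by
  rw [pvGoodb_false_iff] at *
  omega

theorem pvGoodb_antisymm {x y : Int × Int} (h1 : pvGoodb x y = false) (h2 : pvGoodb y x = false) :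
    x = y := by
  rw [pvGoodb_false_iff] at *
  have : x.1 = y.1 ∧ x.2 = y.2 := by omega
  exact Prod.ext this.1 this.2

theorem pvStep_some (c b : Int) (p : Int × Int) :
    pvStep (c, some b) p = ((pvMax (c, b) p).1, some (pvMax (c, b) p).2) := by
  simp only [pvStep, pvMax, pvGoodb]
  split <;> simp_all

theorem foldl_pvStep_some (l : List (Int × Int)) : ∀ (c b : Int),
    l.foldl pvStep (c, some b) = ((l.foldl pvMax (c, b)).1, some (l.foldl pvMax (c, b)).2) := by
  induction l with
  | nil => intro c b; rfl
  | cons p t ih =>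
      intro c b
      simp only [List.foldl_cons, pvStep_some]
      exact ih _ _

theorem pvStep_start {p : Int × Int} (h : 0 ≤ p.1) : pvStep (0, none) p = (p.1, some p.2) := by
  simp only [pvStep]
  split
  · rfl
  · rename_i hc
    exfalso
    simp at hc
    omega

theorem foldl_pvMax_mem (l : List (Int × Int)) : ∀ (a : Int × Int),
    l.foldl pvMax a = a ∨ l.foldl pvMax a ∈ l := by
  induction l with
  | nil => intro a; left; rfl
  | cons p t ih =>
      intro a
      simp only [List.foldl_cons, pvMax]
      split
      · rcases ih p with h | h
        · right; simp [h]
        · right; exact List.mem_cons_of_mem _ h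
      · rcases ih a with h | h
        · left; exact h
        · right; exact List.mem_cons_of_mem _ h

theorem foldl_pvMax_ge (l : List (Int × Int)) : ∀ (a : Int × Int),
    pvGoodb (l.foldl pvMax a) a = false ∧ ∀ q ∈ l, pvGoodb (l.foldl pvMax a) q = false := by
  induction l with
  | nil =>
      intro a; exact ⟨pvGoodb_irrefl a, by intro q hq; cases hq⟩
  | cons p t ih =>
      intro a
      simp only [List.foldl_cons]
      by_cases hg : pvGoodb a p = true
      · have hstep : pvMax a p = p := by simp [pvMax, hg]
        rw [hstep]
        rcases ih p with ⟨h1, h2⟩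
        have hap : pvGoodb (t.foldl pvMax p) a = false := by
          refine pvGoodb_trans_not h1 ?_
          rw [pvGoodb_true_iff] at hg
          rw [pvGoodb_false_iff]
          omega
        refine ⟨hap, ?_⟩
        intro q hq
        rcases List.mem_cons.mp hq with rfl | hq
        · exact h1
        · exact h2 q hq
      · have hg' : pvGoodb a p = false := by simpa using hg
        have hstep : pvMax a p = a := by simp [pvMax, hg']
        rw [hstep]
        rcases ih a with ⟨h1, h2⟩
        refine ⟨h1, ?_⟩
        intro q hq
        rcases List.mem_cons.mp hq with rfl | hq
        · exact pvGoodb_trans_not h1 hg'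
        · exact h2 q hq

-- best element of a nonempty candidate list
def pvBest (x : Int × Int) (t : List (Int × Int)) : Int × Int := t.foldl pvMax x

theorem pvBest_mem (x : Int × Int) (t : List (Int × Int)) : pvBest x t ∈ x :: t := by
  rcases foldl_pvMax_mem t x with h | h
  · rw [pvBest, h]; exact List.mem_cons_self
  · exact List.mem_cons_of_mem _ h

theorem pvBest_ge (x : Int × Int) (t : List (Int × Int)) :
    ∀ q ∈ x :: t, pvGoodb (pvBest x t) q = false := by
  intro q hq
  rcases List.mem_cons.mp hq with rfl | hq
  · exact (foldl_pvMax_ge t q).1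
  · exact (foldl_pvMax_ge t x).2 q hq

-- two nonempty lists with mutual domination have the same best element
theorem pvBest_congr (x₁ : Int × Int) (t₁ : List (Int × Int)) (x₂ : Int × Int) (t₂ : List (Int × Int))
    (h21 : ∀ q ∈ x₂ :: t₂, q ∈ x₁ :: t₁)
    (h12 : ∀ p ∈ x₁ :: t₁, ∃ q ∈ x₂ :: t₂, pvGoodb q p = false) :
    pvBest x₁ t₁ = pvBest x₂ t₂ := by
  have hb1 := pvBest_mem x₁ t₁
  have hb2 := pvBest_mem x₂ t₂
  have h1 : pvGoodb (pvBest x₁ t₁) (pvBest x₂ t₂) = false :=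
    pvBest_ge x₁ t₁ _ (h21 _ hb2)
  obtain ⟨q, hq, hqb⟩ := h12 _ hb1
  have h2 : pvGoodb (pvBest x₂ t₂) (pvBest x₁ t₁) = false :=
    pvGoodb_trans_not (pvBest_ge x₂ t₂ q hq) hqb
  exact (pvGoodb_antisymm h2 h1).symm

-- running a selection fold over a nonempty list of candidates with nonneg first candidate count
theorem foldl_pvStep_best (x : Int × Int) (t : List (Int × Int)) (hx : 0 ≤ x.1) :
    (x :: t).foldl pvStep (0, none) = ((pvBest x t).1, some (pvBest x t).2) := by
  simp only [List.foldl_cons, pvStep_start hx]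
  exact foldl_pvStep_some t x.1 x.2

-- ---------- characterisation of port A's inner count ----------

def pvTargets (nums : List Int) (space : Int) (num : Int) : Int :=
  (PySem.List.pyRange num ((PySem.List.max? nums (fun x => x)).getD 0 + space) space).foldl
    (fun acc i => if nums.contains i then acc + 1 else acc) 0

def pvKey (space v : Int) : Int := PySem.Int.mod v space

-- distinct members of nums in the residue class r
def pvCls (nums : List Int) (space r : Int) : List Int :=
  (PySem.List.dedup nums).filter (fun u => pvKey space u == r)

-- number of distinct members of num's class that are ≥ num
def pvT (nums : List Int) (space num : Int) : Int :=
  (((pvCls nums space (pvKey space num)).filter (fun u => decide (num ≤ u))).length : Int)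

theorem foldl_count {α : Type} (p : α → Bool) (l : List α) : ∀ (a : Int),
    l.foldl (fun acc i => if p i then acc + 1 else acc) a = a + (l.countP p : Int) := by
  induction l with
  | nil => intro a; simp
  | cons x t ih =>
      intro a
      simp only [List.foldl_cons, List.countP_cons]
      by_cases h : p x = true
      · rw [if_pos h, ih, h]; simp; push_cast; ring
      · rw [if_neg h, ih]; simp [h]

theorem countP_eq_of_nodup {l₁ l₂ : List Int} {p₁ p₂ : Int → Bool}
    (h₁ : l₁.Nodup) (h₂ : l₂.Nodup)
    (h : ∀ x, (x ∈ l₁ ∧ p₁ x = true) ↔ (x ∈ l₂ ∧ p₂ x = true)) :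
    l₁.countP p₁ = l₂.countP p₂ := by
  rw [List.countP_eq_length_filter, List.countP_eq_length_filter]
  have hperm : (l₁.filter p₁).Perm (l₂.filter p₂) := by
    rw [List.perm_ext_iff_of_nodup (h₁.filter _) (h₂.filter _)]
    intro a
    simp only [List.mem_filter]
    exact h a
  exact hperm.length_eq

theorem nodup_pyRange_of_pos (a b : Int) {s : Int} (hs : 0 < s) :
    (PySem.List.pyRange a b s).Nodup := by
  rw [PySem.List.pyRange_of_pos a b hs]
  refine List.Nodup.map ?_ (List.nodup_range)
  intro i j hij
  have : a + s * (i : Int) = a + s * (j : Int) := hij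
  have : (i : Int) = j := by
    have hs' : s ≠ 0 := by omega
    have := mul_left_cancel₀ hs' (by omega : s * (i : Int) = s * (j : Int))
    exact this
  exact_mod_cast this

theorem key_eq_iff_dvd {space u v : Int} (hs : 1 ≤ space) :
    pvKey space u = pvKey space v ↔ space ∣ u - v := by
  unfold pvKey
  rw [PySem.Int.mod_eq_emod_of_pos (by omega), PySem.Int.mod_eq_emod_of_pos (by omega)]
  constructor
  · intro h
    exact Int.dvd_of_emod_eq_zero (by rw [Int.sub_emod, h]; simp)
  · intro h
    exact Int.emod_eq_emod_iff_emod_sub_eq_zero.mpr (Int.emod_eq_zero_of_dvd h)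

-- A's inner count equals the distinct-class suffix count, for any num ∈ nums
theorem pvTargets_eq_pvT {nums : List Int} {space : Int} (hne : nums ≠ []) (hs : 1 ≤ space)
    {num : Int} (hmem : num ∈ nums) :
    pvTargets nums space num = pvT nums space num := by
  obtain ⟨m, hm⟩ : ∃ m, PySem.List.max? nums (fun x => x) = some m := by
    cases h : PySem.List.max? nums (fun x => x) with
    | none => exact absurd ((PySem.List.max?_eq_none_iff _ _).mp h) hne
    | some m => exact ⟨m, rfl⟩
  have hmax : ∀ y ∈ nums, y ≤ m := by
    intro y hy; exact PySem.List.max?_isMax hm y hy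
  unfold pvTargets pvT
  rw [hm]
  simp only [Option.getD_some]
  rw [foldl_count, List.countP_eq_length_filter]
  simp only [zero_add]
  congr 1
  have := countP_eq_of_nodup (l₁ := PySem.List.pyRange num (m + space) space)
    (l₂ := (pvCls nums space (pvKey space num)).filter (fun u => decide (num ≤ u)))
    (p₁ := fun i => nums.contains i) (p₂ := fun _ => true)
    (nodup_pyRange_of_pos _ _ (by omega))
    (((PySem.List.nodup_dedup nums).filter _).filter _)
    ?_
  · rw [List.countP_eq_length_filter, List.countP_eq_length_filter] at this
    simp only [List.filter_true] at this
    exact this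
  · intro x
    simp only [List.mem_filter, and_true, List.contains_eq_mem, decide_eq_true_eq]
    unfold pvCls
    simp only [List.mem_filter, PySem.List.mem_dedup, beq_iff_eq, decide_eq_true_eq]
    rw [PySem.List.mem_pyRange_iff_of_pos (by omega)]
    constructor
    · rintro ⟨⟨h1, h2, h3⟩, h4⟩
      refine ⟨⟨h4, (key_eq_iff_dvd hs).mpr h3⟩, h1⟩
    · rintro ⟨⟨h4, hk⟩, h1⟩
      refine ⟨⟨h1, ?_, (key_eq_iff_dvd hs).mp hk⟩, h4⟩
      have := hmax x h4
      omega

-- ---------- port A as a best-selection over candidate pairs ----------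

theorem portA_eq_best {nums : List Int} {space : Int} (v : Int) (t : List Int)
    (hnums : nums = v :: t) :
    min_value_to_destroy_targets nums space =
      (pvBest (pvTargets nums space v, v) (t.map (fun u => (pvTargets nums space u, u)))).2 := by
  subst hnums
  set nums := v :: t with hnums
  have hfold : nums.foldl (fun st num =>
      let targets : Int :=
        (PySem.List.pyRange num ((PySem.List.max? nums (fun x => x)).getD 0 + space) space).foldl
          (fun acc i => if nums.contains i then acc + 1 else acc) 0
      if targets > st.1 || (targets == st.1 &&
          (match st.2 with | none => true | some mv => decide (num < mv))) then
        (targets, some num)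
      else st) ((0 : Int), (none : Option Int)) =
      (nums.map (fun u => (pvTargets nums space u, u))).foldl pvStep (0, none) := by
    rw [List.foldl_map]
    rfl
  have hx : (0 : Int) ≤ pvTargets nums space v := by
    unfold pvTargets
    rw [foldl_count]
    positivity
  unfold min_value_to_destroy_targets
  simp only
  rw [hfold, hnums, List.map_cons, foldl_pvStep_best _ _ hx]
  rfl


-- ---------- port B: the grouping fold ----------

def pvGStep (space : Int) (g : PySem.Dict Int (Int × Int)) (v : Int) : PySem.Dict Int (Int × Int) :=
  match g.get? (PySem.Int.mod v space) with
  | some (cnt, mn) => g.insert (PySem.Int.mod v space) (cnt + 1, if v < mn then v else mn)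
  | none => g.insert (PySem.Int.mod v space) (1, v)

def pvNewVal (space : Int) (g : PySem.Dict Int (Int × Int)) (v : Int) : Int × Int :=
  match g.get? (PySem.Int.mod v space) with
  | some (cnt, mn) => (cnt + 1, if v < mn then v else mn)
  | none => (1, v)

theorem pvGStep_eq_insert (space : Int) (g : PySem.Dict Int (Int × Int)) (v : Int) :
    pvGStep space g v = g.insert (PySem.Int.mod v space) (pvNewVal space g v) := by
  unfold pvGStep pvNewVal
  cases h : g.get? (PySem.Int.mod v space) with
  | none => rfl
  | some p => cases p; rfl

-- named form of port B's grouping step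
def pvBStep (space : Int) (p : PySem.Set Int × PySem.Dict Int (Int × Int)) (v : Int) :
    PySem.Set Int × PySem.Dict Int (Int × Int) :=
  if PySem.Set.contains p.1 v then p
  else
    let r := PySem.Int.mod v space
    match p.2.get? r with
    | some (cnt, mn) => (PySem.Set.add p.1 v, p.2.insert r (cnt + 1, if v < mn then v else mn))
    | none => (PySem.Set.add p.1 v, p.2.insert r (1, v))

theorem pvBStep_mem {space : Int} {s : PySem.Set Int} {g : PySem.Dict Int (Int × Int)} {v : Int}
    (hc : PySem.Set.contains s v = true) : pvBStep space (s, g) v = (s, g) := by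
  unfold pvBStep
  rw [show PySem.Set.contains (s, g).1 v = true from hc]
  simp

theorem set_add_of_contains {s : PySem.Set Int} {v : Int}
    (hc : PySem.Set.contains s v = true) : PySem.Set.add s v = s := by
  unfold PySem.Set.add
  rw [hc]
  simp

theorem set_add_of_not_contains {s : PySem.Set Int} {v : Int}
    (hc : PySem.Set.contains s v = false) : PySem.Set.add s v = s ++ [v] := by
  unfold PySem.Set.add
  rw [hc]
  simp

theorem pvBStep_new {space : Int} {s : PySem.Set Int} {g : PySem.Dict Int (Int × Int)} {v : Int}
    (hc : PySem.Set.contains s v = false) :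
    pvBStep space (s, g) v = (s ++ [v], pvGStep space g v) := by
  unfold pvBStep pvGStep
  rw [show PySem.Set.contains (s, g).1 v = false from hc]
  simp only [Bool.false_eq_true, if_false]
  cases h : g.get? (PySem.Int.mod v space) with
  | none => simp [h, set_add_of_not_contains hc]
  | some p => cases p; simp [h, set_add_of_not_contains hc]

-- the seen-set fold of port B is the plain grouping fold over the deduplicated list
theorem portB_fold_eq (space : Int) (l : List Int) : ∀ (s : PySem.Set Int),
    l.foldl (pvBStep space) (s, s.foldl (pvGStep space) PySem.Dict.empty) =
    (PySem.Set.update s l, (PySem.Set.update s l).foldl (pvGStep space) PySem.Dict.empty) := by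
  induction l with
  | nil => intro s; rfl
  | cons v t ih =>
      intro s
      rw [List.foldl_cons]
      by_cases hc : PySem.Set.contains s v = true
      · rw [pvBStep_mem hc]
        have hupd : PySem.Set.update s (v :: t) = PySem.Set.update s t := by
          show PySem.Set.update (PySem.Set.add s v) t = _
          rw [set_add_of_contains hc]
        rw [hupd]
        exact ih s
      · have hc' : PySem.Set.contains s v = false := by simpa using hc
        rw [pvBStep_new hc']
        have hupd : PySem.Set.update s (v :: t) = PySem.Set.update (s ++ [v]) t := by
          show PySem.Set.update (PySem.Set.add s v) t = _
          rw [set_add_of_not_contains hc']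
        rw [hupd]
        have hg : pvGStep space (s.foldl (pvGStep space) PySem.Dict.empty) v =
            (s ++ [v]).foldl (pvGStep space) PySem.Dict.empty := by
          rw [List.foldl_append]
          rfl
        rw [hg]
        exact ih (s ++ [v])

-- list min over a nonempty class
def pvMinOf (u : Int) (us : List Int) : Int := us.foldl min u

theorem pvMinOf_mem (u : Int) (us : List Int) : pvMinOf u us ∈ u :: us := by
  have := PySem.List.min?_id_cons u us
  have hm := PySem.List.min?_mem (key := fun y => y) (xs := u :: us) (m := pvMinOf u us)
  exact hm (by rw [this]; rfl)

theorem pvMinOf_le (u : Int) (us : List Int) : ∀ x ∈ u :: us, pvMinOf u us ≤ x := by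
  intro x hx
  have := PySem.List.min?_id_cons u us
  have hm := PySem.List.min?_isMin (key := fun y => y) (xs := u :: us) (m := pvMinOf u us)
    (by rw [this]; rfl)
  exact hm x hx

-- characterisation of the grouping dict
theorem gfold_get? (space : Int) (l : List Int) (r : Int) :
    (l.foldl (pvGStep space) PySem.Dict.empty).get? r =
      match l.filter (fun u => PySem.Int.mod u space == r) with
      | [] => none
      | u :: us => some (((u :: us).length : Int), pvMinOf u us) := by
  induction l using List.reverseRecOn with
  | nil => simp [PySem.Dict.get?_empty]
  | append_singleton t v ih =>
      rw [List.foldl_append]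
      simp only [List.foldl_cons, List.foldl_nil]
      rw [pvGStep_eq_insert, PySem.Dict.get?_insert, List.filter_append]
      have hfv : List.filter (fun u => PySem.Int.mod u space == r) [v]
          = if PySem.Int.mod v space = r then [v] else [] := by
        by_cases h : PySem.Int.mod v space = r <;> simp [List.filter_singleton, h]
      rw [hfv]
      by_cases hk : PySem.Int.mod v space = r
      · subst hk
        rw [if_pos rfl, if_pos rfl]
        unfold pvNewVal
        rw [ih]
        cases hf : t.filter (fun u => PySem.Int.mod u space == PySem.Int.mod v space) with
        | nil => simp [pvMinOf]
        | cons u us =>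
            simp only [List.cons_append]
            congr 1
            have hlen : (((u :: us) ++ [v]).length : Int) = ((u :: us).length : Int) + 1 := by
              simp
            have hmin : pvMinOf u (us ++ [v]) = if v < pvMinOf u us then v else pvMinOf u us := by
              unfold pvMinOf
              rw [List.foldl_append]
              simp only [List.foldl_cons, List.foldl_nil]
              rcases lt_or_ge v (us.foldl min u) with h | h
              · rw [if_pos h]; omega
              · rw [if_neg (by omega)]; omega
            rw [hmin]
            have : ((u :: (us ++ [v])).length : Int) = ((u :: us).length : Int) + 1 := by simp
            rw [this]
      · rw [if_neg (fun h => hk h.symm), if_neg hk, List.append_nil]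
        exact ih

-- ===== main equivalence =====

theorem main_equiv (nums : List Int) (space : Int)
    (hne : nums ≠ []) (hs : 1 ≤ space) :
    min_value_to_destroy_targets nums space = min_value_to_destroy_targets_alt nums space := by
  -- notation
  set D := PySem.List.dedup nums with hD
  have hDnodup : D.Nodup := PySem.List.nodup_dedup nums
  -- B's dict
  set g : PySem.Dict Int (Int × Int) := D.foldl (pvGStep space) PySem.Dict.empty with hg
  -- B's port reduces to the selection over g.values
  have hBfold := portB_fold_eq space nums PySem.Set.empty
  have hBdict : (nums.foldl (pvBStep space)
      (PySem.Set.empty, PySem.Dict.empty)).2 = g := by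
    rw [show ((PySem.Set.empty : PySem.Set Int), (PySem.Dict.empty : PySem.Dict Int (Int × Int)))
        = ((PySem.Set.empty : PySem.Set Int),
           (PySem.Set.empty : PySem.Set Int).foldl (pvGStep space) PySem.Dict.empty) from rfl,
       hBfold]
    show (PySem.Set.update [] nums).foldl (pvGStep space) PySem.Dict.empty = g
    rw [PySem.Set.update_nil_left, hg, hD, PySem.List.dedup_eq_ofList]
  -- keys of g
  have hfun : (pvGStep space) = (fun d x => d.insert (PySem.Int.mod x space) (pvNewVal space d x)) :=
    funext fun d => funext fun x => pvGStep_eq_insert space d x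
  have hkeys : g.keys = PySem.Set.ofList (D.map (fun v => PySem.Int.mod v space)) := by
    rw [hg, hfun, PySem.Dict.keys_foldl_insert_key]
    rw [show (PySem.Dict.empty : PySem.Dict Int (Int × Int)).keys = [] from rfl]
    rw [PySem.Set.update_nil_left]
  have hkeysnodup : g.keys.Nodup := by
    rw [hg, hfun]
    exact PySem.Dict.nodup_keys_foldl_insert_key _ _ _ _ (by simp [PySem.Dict.keys_empty])
  have hvalues := PySem.Dict.values_eq_map_keys g hkeysnodup ((0 : Int), (0 : Int))
  -- the class pair at key r, for r a key of g
  have hclass : ∀ r ∈ g.keys, ∃ u us, pvCls nums space r = u :: us ∧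
      g.getD r (0, 0) = (((u :: us).length : Int), pvMinOf u us) := by
    intro r hr
    rw [hkeys, PySem.Set.mem_ofList] at hr
    obtain ⟨w, hw, hwk⟩ := List.mem_map.mp hr
    have hfil : w ∈ D.filter (fun u => PySem.Int.mod u space == r) := by
      rw [List.mem_filter]
      exact ⟨hw, by simp [hwk]⟩
    cases hf : D.filter (fun u => PySem.Int.mod u space == r) with
    | nil => rw [hf] at hfil; cases hfil
    | cons u us =>
        refine ⟨u, us, ?_, ?_⟩
        · unfold pvCls; rw [← hD]; exact hf
        · rw [PySem.Dict.getD_eq_get?_getD, hg, gfold_get?]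
          rw [hf]
          rfl
  -- every value of g is a candidate pair of A
  have hval_cand : ∀ q ∈ g.values, ∃ v ∈ nums, q = (pvT nums space v, v) := by
    intro q hq
    rw [hvalues] at hq
    obtain ⟨r, hr, hrq⟩ := List.mem_map.mp hq
    obtain ⟨u, us, hcls, hgd⟩ := hclass r hr
    set v := pvMinOf u us with hv
    have hvmem : v ∈ u :: us := pvMinOf_mem u us
    have hvin : v ∈ pvCls nums space r := by rw [hcls]; exact hvmem
    have hvD : v ∈ D := (List.mem_filter.mp hvin).1
    have hvkey : pvKey space v = r := by
      have := (List.mem_filter.mp hvin).2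
      simpa [pvKey] using this
    refine ⟨v, (PySem.List.mem_dedup nums v).mp hvD, ?_⟩
    rw [← hrq, hgd]
    have hTv : pvT nums space v = ((u :: us).length : Int) := by
      unfold pvT
      rw [hvkey, hcls]
      congr 1
      rw [List.length_filter_eq_length_iff.mpr]
      intro x hx
      simp only [decide_eq_true_eq]
      exact pvMinOf_le u us x hx
    rw [hTv]
  -- every candidate of A is dominated by some value of g
  have hcand_dom : ∀ v ∈ nums, ∃ q ∈ g.values, pvGoodb q (pvT nums space v, v) = false := by
    intro v hv
    have hvD : v ∈ D := (PySem.List.mem_dedup nums v).mpr hv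
    have hrk : pvKey space v ∈ g.keys := by
      rw [hkeys, PySem.Set.mem_ofList]
      exact List.mem_map.mpr ⟨v, hvD, rfl⟩
    obtain ⟨u, us, hcls, hgd⟩ := hclass _ hrk
    refine ⟨g.getD (pvKey space v) (0, 0), ?_, ?_⟩
    · rw [hvalues]
      exact List.mem_map.mpr ⟨_, hrk, rfl⟩
    · rw [hgd]
      have hvin : v ∈ u :: us := by
        rw [← hcls]
        unfold pvCls
        rw [← hD, List.mem_filter]
        exact ⟨hvD, by simp [pvKey]⟩
      have hle : pvT nums space v ≤ ((u :: us).length : Int) := by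
        unfold pvT
        rw [hcls]
        exact_mod_cast List.length_filter_le _ _
      rcases eq_or_lt_of_le hle with heq | hlt
      · -- then v is the class minimum and the pairs coincide
        have hall : ∀ x ∈ u :: us, v ≤ x := by
          have : ((u :: us).filter (fun x => decide (v ≤ x))).length = (u :: us).length := by
            have := heq
            unfold pvT at this
            rw [hcls] at this
            exact_mod_cast this
          intro x hx
          have := List.length_filter_eq_length_iff.mp this x hx
          simpa using this
        have h1 : v ≤ pvMinOf u us := hall _ (pvMinOf_mem u us)
        have h2 : pvMinOf u us ≤ v := pvMinOf_le u us v hvin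
        have hveq : pvMinOf u us = v := le_antisymm h2 h1
        rw [hveq, ← heq]
        exact pvGoodb_irrefl _
      · rw [pvGoodb_false_iff]
        left
        simpa using hlt
  -- nonemptiness: pick the head of nums
  obtain ⟨v₀, t₀, hnums⟩ : ∃ v t, nums = v :: t := by
    cases nums with
    | nil => exact absurd rfl hne
    | cons a l => exact ⟨a, l, rfl⟩
  have hvalsne : g.values ≠ [] := by
    have hrk : pvKey space v₀ ∈ g.keys := by
      rw [hkeys, PySem.Set.mem_ofList]
      exact List.mem_map.mpr ⟨v₀, (PySem.List.mem_dedup nums v₀).mpr (by rw [hnums]; exact List.mem_cons_self), rfl⟩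
    intro habs
    rw [hvalues] at habs
    have : g.keys = [] := by
      cases hk : g.keys with
      | nil => rfl
      | cons a l => rw [hk] at habs; simp at habs
    rw [this] at hrk; cases hrk
  obtain ⟨q₀, qs, hvals⟩ : ∃ q qs, g.values = q :: qs := by
    cases hv : g.values with
    | nil => exact absurd hv hvalsne
    | cons a l => exact ⟨a, l, rfl⟩
  -- A's port as best
  have hA := portA_eq_best (nums := nums) (space := space) v₀ t₀ hnums
  have hmapT : (t₀.map (fun u => (pvTargets nums space u, u))) =
      (t₀.map (fun u => (pvT nums space u, u))) := by
    apply List.map_congr_left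
    intro u hu
    rw [pvTargets_eq_pvT hne hs (by rw [hnums]; exact List.mem_cons_of_mem _ hu)]
  have hheadT : (pvTargets nums space v₀, v₀) = (pvT nums space v₀, v₀) := by
    rw [pvTargets_eq_pvT hne hs (by rw [hnums]; exact List.mem_cons_self)]
  rw [hmapT, hheadT] at hA
  -- B's port as best
  have hq0 : (0 : Int) ≤ q₀.1 := by
    obtain ⟨v, hv, hq⟩ := hval_cand q₀ (by rw [hvals]; exact List.mem_cons_self)
    rw [hq]
    unfold pvT
    positivity
  have hB : min_value_to_destroy_targets_alt nums space = (pvBest q₀ qs).2 := by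
    unfold min_value_to_destroy_targets_alt
    simp only
    show ((nums.foldl (pvBStep space)
        (PySem.Set.empty, PySem.Dict.empty)).2.values.foldl pvStep (0, none)).2.getD 0
      = (pvBest q₀ qs).2
    rw [hBdict, hvals, foldl_pvStep_best _ _ hq0]
    rfl
  rw [hA, hB]
  -- the two bests coincide
  have hlistA : (pvT nums space v₀, v₀) :: t₀.map (fun u => (pvT nums space u, u)) =
      nums.map (fun u => (pvT nums space u, u)) := by
    rw [hnums, List.map_cons]
  congr 1
  apply pvBest_congr
  · -- every value of g is a candidate of A
    intro q hq
    rw [← hvals] at hq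
    obtain ⟨v, hv, hqv⟩ := hval_cand q hq
    rw [hlistA, hqv]
    exact List.mem_map.mpr ⟨v, hv, rfl⟩
  · -- every candidate of A is dominated by a value of g
    intro p hp
    rw [hlistA] at hp
    obtain ⟨v, hv, hpv⟩ := List.mem_map.mp hp
    obtain ⟨q, hq, hqd⟩ := hcand_dom v hv
    rw [← hvals]
    exact ⟨q, hq, hpv ▸ hqd⟩

-- ===== VERDICT (by name: the statement is the Claim_ definition above) =====
theorem min_value_to_destroy_targets_spec : Claim_equal_min_value_to_destroy_targets := by
  intro nums space _ hpre
  unfold Spec_min_value_to_destroy_targets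
  exact main_equiv nums space hpre.1 hpre.2
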